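-- pv_equiv track=rewrite | github.com/mhalittokluoglu/ElGamal_Project | app.py | byte_to_long
-- ===== SOURCE A (Python) =====
-- def byte_to_long(a):
--     num = 0
--     counter = 0
--     for i in a:
--         if counter < 3:
--             num = 16*(num+i)
--         else:
--             num = num+i
--         counter+=1
--     return num
-- ===== SOURCE B (Python) =====
-- def byte_to_long(a):
--     a = list(a)
--     head = a[:3]
--     tail = a[3:]
--     m = len(head)
--     return sum(16 ** (m - k) * v for k, v in enumerate(head)) + sum(tail)
-- ===== Notes on version B (the rewrite author's own statement) =====
-- stated objective: simpler
-- what changed: Replaced the running multiply-accumulate loop with a head/tail split: a closed-form weighted sum (powers of 16) over the first min(len,3) bytes plus a plain sum of the rest.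
import Mathlib
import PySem

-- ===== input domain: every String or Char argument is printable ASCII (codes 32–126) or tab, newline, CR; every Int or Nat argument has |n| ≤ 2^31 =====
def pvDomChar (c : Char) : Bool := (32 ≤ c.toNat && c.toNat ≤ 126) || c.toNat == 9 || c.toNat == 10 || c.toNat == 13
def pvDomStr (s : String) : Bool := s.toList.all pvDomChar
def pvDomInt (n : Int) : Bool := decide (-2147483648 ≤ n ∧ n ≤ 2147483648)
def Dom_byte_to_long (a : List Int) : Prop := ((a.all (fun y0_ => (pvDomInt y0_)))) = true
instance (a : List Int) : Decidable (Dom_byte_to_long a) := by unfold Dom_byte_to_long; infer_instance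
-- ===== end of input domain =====

-- B replaces A's running multiply-accumulate with a head/tail split: explicit powers of 16
-- over the first min(len,3) bytes plus a plain sum of the rest (objective: simpler).


-- ===== PORT A =====
-- for-loop over a with state (num, counter)
def byte_to_long (a : List Int) : Int :=
  (a.foldl (fun (st : Int × Int) i =>
    (if st.2 < 3 then 16 * (st.1 + i) else st.1 + i, st.2 + 1)) (0, 0)).1

-- ===== PORT B =====
def byte_to_long_alt (a : List Int) : Int :=
  let head := PySem.List.slice a none (some 3)
  let tail := PySem.List.slice a (some 3) none
  let m : Int := head.length
  ((PySem.List.enumerate head).map (fun kv => 16 ^ (m - kv.1).toNat * kv.2)).sum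
    + tail.sum

-- ===== PRECONDITION & SPEC =====
def Spec_byte_to_long (a : List Int) (out : Int) : Prop := out = byte_to_long_alt a
instance (a : List Int) (out : Int) : Decidable (Spec_byte_to_long a out) := by unfold Spec_byte_to_long; infer_instance

-- ===== CLAIM (what is proved, stated in full; the proofs are below) =====
def Claim_equal_byte_to_long : Prop := ∀ (a : List Int), Dom_byte_to_long a → Spec_byte_to_long a (byte_to_long a)

-- ===== LEMMAS AND PROOFS =====

-- once the counter is ≥ 3, A's loop just adds the remaining elements
theorem byteA_tail (l : List Int) (num c : Int) (hc : 3 ≤ c) :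
    (l.foldl (fun (st : Int × Int) i =>
      (if st.2 < 3 then 16 * (st.1 + i) else st.1 + i, st.2 + 1)) (num, c)).1
      = num + l.sum := by
  induction l generalizing num c with
  | nil => simp
  | cons x xs ih =>
    simp only [List.foldl_cons, List.sum_cons]
    rw [if_neg (by omega)]
    rw [ih (num + x) (c + 1) (by omega)]
    ring

-- ===== VERDICT (by name: the statement is the Claim_ definition above) =====
theorem byte_to_long_spec : Claim_equal_byte_to_long := by
  intro a _
  unfold Spec_byte_to_long
  match a with
  | [] => decide
  | [x] =>
    simp [byte_to_long, byte_to_long_alt, PySem.List.slice, PySem.List.enumerate]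
  | [x, y] =>
    simp [byte_to_long, byte_to_long_alt, PySem.List.slice, PySem.List.enumerate]
    ring
  | x :: y :: z :: rest =>
    show (List.foldl _ (0, 0) (x :: y :: z :: rest)).1 = _
    simp only [List.foldl_cons]
    norm_num
    rw [byteA_tail rest _ 3 le_rfl]
    simp [byte_to_long_alt, PySem.List.slice, PySem.List.enumerate]
    ring
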